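-- pv_equiv track=rewrite | github.com/dani-ribeiro/PortfolioPro | Citadel-Project/model.py | clean_up
-- ===== SOURCE A (Python) =====
-- def clean_up(ticker_list, shares_list):
--     new_ticker_list = []
--     new_shares_list = []
--     for i, ticker in enumerate(ticker_list):
--         if not(ticker in ["NONE", "none", "None", ""]):
--             if ticker in new_ticker_list:
--                 ix = new_ticker_list.index(ticker)
--                 new_shares_list[ix] += shares_list[i]
--             else:
--                 new_ticker_list.append(ticker)
--                 new_shares_list.append(int(shares_list[i]))
--     return new_ticker_list, new_shares_list
-- ===== SOURCE B (Python) =====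
-- SKIP = ("NONE", "none", "None", "")
--
-- def clean_up(ticker_list, shares_list):
--     # pass 1: the distinct non-sentinel tickers in first-seen order
--     seen = set()
--     order = []
--     for t in ticker_list:
--         if t not in SKIP and t not in seen:
--             seen.add(t)
--             order.append(t)
--     # pass 2: for each ticker, sum its shares by scanning the whole input
--     totals = [sum(s for u, s in zip(ticker_list, shares_list) if u == t) for t in order]
--     return order, totals
-- ===== Notes on version B (the rewrite author's own statement) =====
-- stated objective: alternative
-- what changed: B replaces A's single incremental pass (parallel result lists updated in place via membership/.index scans) by a staged group-by: one pass collects the distinct non-sentinel tickers in first-seen order, then each ticker's total is computed by an independent full scan of zip(ticker_list, shares_list).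
import Mathlib
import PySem

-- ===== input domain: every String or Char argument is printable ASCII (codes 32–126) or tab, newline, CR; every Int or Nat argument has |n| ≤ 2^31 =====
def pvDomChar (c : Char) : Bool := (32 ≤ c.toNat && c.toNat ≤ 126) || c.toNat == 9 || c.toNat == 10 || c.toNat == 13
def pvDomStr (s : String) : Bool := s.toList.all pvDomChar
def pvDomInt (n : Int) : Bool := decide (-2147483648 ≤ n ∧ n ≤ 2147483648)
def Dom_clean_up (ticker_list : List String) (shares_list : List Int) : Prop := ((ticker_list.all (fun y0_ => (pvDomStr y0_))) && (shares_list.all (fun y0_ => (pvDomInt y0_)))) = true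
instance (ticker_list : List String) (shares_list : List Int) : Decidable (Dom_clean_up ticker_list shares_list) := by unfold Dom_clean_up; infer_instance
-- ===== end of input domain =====

-- B replaces A's single incremental pass (parallel result lists updated in place) by a staged
-- group-by: collect the distinct non-sentinel tickers first, then sum each ticker's shares by an
-- independent scan of the zipped input.

-- ===== PORT A =====
def pvSentinels : List String := ["NONE", "none", "None", ""]

-- the loop body of A; reads shares_list[i] via pyGet? (getD 0 is unreachable inside Pre_,
-- where Python would raise IndexError instead)
def cleanStepA (shares_list : List Int) (st : List String × List Int) (p : Int × String) :
    List String × List Int :=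
  if ¬ (p.2 ∈ pvSentinels) then
    if p.2 ∈ st.1 then
      let ix := (PySem.List.index? st.1 p.2).getD 0
      (st.1, st.2.set ix (st.2.getD ix 0 + (PySem.List.pyGet? shares_list p.1).getD 0))
    else
      (st.1 ++ [p.2], st.2 ++ [(PySem.List.pyGet? shares_list p.1).getD 0])
  else st

def clean_up (ticker_list : List String) (shares_list : List Int) : List String × List Int :=
  (PySem.List.enumerate ticker_list).foldl (cleanStepA shares_list) ([], [])

-- ===== PORT B =====
def pvSkipB : List String := ["NONE", "none", "None", ""]

-- pass 1 of B: 'if t not in SKIP and t not in seen: seen.add(t); order.append(t)'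
def orderStep (st : PySem.Set String × List String) (t : String) :
    PySem.Set String × List String :=
  if ¬ (t ∈ pvSkipB) ∧ ¬ (t ∈ st.1) then (PySem.Set.add st.1 t, st.2 ++ [t]) else st

-- pass 2 of B: 'sum(s for u, s in zip(ticker_list, shares_list) if u == t)'
def sumFor (ticker_list : List String) (shares_list : List Int) (t : String) : Int :=
  (((ticker_list.zip shares_list).filter (fun p => p.1 == t)).map Prod.snd).sum

def clean_up_alt (ticker_list : List String) (shares_list : List Int) : List String × List Int :=
  let order := (ticker_list.foldl orderStep (PySem.Set.empty, [])).2
  (order, order.map (sumFor ticker_list shares_list))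

-- ===== PRECONDITION & SPEC =====
-- Pre_ excludes exactly the inputs where Python A raises IndexError: a non-sentinel ticker at an
-- index with no corresponding shares_list entry.
def Pre_clean_up (ticker_list : List String) (shares_list : List Int) : Prop :=
  ∀ i, i < ticker_list.length → ¬ (ticker_list.getD i "" ∈ pvSentinels) → i < shares_list.length
instance (ticker_list : List String) (shares_list : List Int) : Decidable (Pre_clean_up ticker_list shares_list) := by unfold Pre_clean_up; infer_instance

def pvWitness_clean_up : List String × List Int := (["AAPL", "none", "AAPL", "GOOG"], [1, 2, 3, 4])

def Spec_clean_up (ticker_list : List String) (shares_list : List Int) (out : List String × List Int) : Prop := out = clean_up_alt ticker_list shares_list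
instance (ticker_list : List String) (shares_list : List Int) (out : List String × List Int) : Decidable (Spec_clean_up ticker_list shares_list out) := by unfold Spec_clean_up; infer_instance

-- ===== CLAIM (what is proved, stated in full; the proofs are below) =====
def Claim_equal_clean_up : Prop := ∀ (ticker_list : List String) (shares_list : List Int), Dom_clean_up ticker_list shares_list → Pre_clean_up ticker_list shares_list → Spec_clean_up ticker_list shares_list (clean_up ticker_list shares_list)

-- ===== LEMMAS AND PROOFS =====

theorem orderStep_diag (s : List String) (t : String) :
    orderStep (s, s) t = if ¬ (t ∈ pvSkipB) ∧ ¬ (t ∈ s) then (s ++ [t], s ++ [t]) else (s, s) := by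
  unfold orderStep
  split_ifs with h
  · rw [PySem.Set.add_of_not_mem h.2]
  · rfl

-- B's first pass keeps seen = order, and produces the distinct non-sentinel tickers in order
theorem ordAux (tl : List String) : ∀ s : List String, s.Nodup →
    ∃ r : List String, tl.foldl orderStep (s, s) = (r, r) ∧ r.Nodup ∧
      (∀ u, u ∈ r ↔ u ∈ s ∨ (u ∈ tl ∧ ¬ (u ∈ pvSkipB))) := by
  induction tl with
  | nil => intro s hs; exact ⟨s, rfl, hs, by simp⟩
  | cons t tl ih =>
    intro s hs
    simp only [List.foldl_cons, orderStep_diag]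
    split_ifs with h
    · obtain ⟨r, he, hnd, hmem⟩ := ih (s ++ [t]) (by
        simp [List.nodup_append, hs]
        intro a ha he
        exact h.2 (he ▸ ha))
      refine ⟨r, he, hnd, fun u => ?_⟩
      rw [hmem u]
      simp only [List.mem_append, List.mem_cons, List.not_mem_nil, or_false]
      constructor
      · rintro ((hu | rfl) | ⟨hu, hns⟩)
        · exact Or.inl hu
        · exact Or.inr ⟨Or.inl rfl, h.1⟩
        · exact Or.inr ⟨Or.inr hu, hns⟩
      · rintro (hu | ⟨(rfl | hu), hns⟩)
        · exact Or.inl (Or.inl hu)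
        · exact Or.inl (Or.inr rfl)
        · exact Or.inr ⟨hu, hns⟩
    · obtain ⟨r, he, hnd, hmem⟩ := ih s hs
      refine ⟨r, he, hnd, fun u => ?_⟩
      rw [hmem u]
      simp only [List.mem_cons]
      rw [not_and_or, not_not, not_not] at h
      constructor
      · rintro (hu | ⟨hu, hns⟩)
        · exact Or.inl hu
        · exact Or.inr ⟨Or.inr hu, hns⟩
      · rintro (hu | ⟨(rfl | hu), hns⟩)
        · exact Or.inl hu
        · rcases h with h | h
          · exact absurd h hns
          · exact Or.inl h
        · exact Or.inr ⟨hu, hns⟩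

theorem ord_spec (tl : List String) :
    ∃ r : List String, tl.foldl orderStep (PySem.Set.empty, []) = (r, r) ∧ r.Nodup ∧
      (∀ u, u ∈ r ↔ u ∈ tl ∧ ¬ (u ∈ pvSkipB)) := by
  obtain ⟨r, he, hnd, hmem⟩ := ordAux tl [] List.nodup_nil
  exact ⟨r, he, hnd, fun u => by simpa using hmem u⟩

theorem zip_append_drop {α β : Type} (xs ys : List α) (zs : List β) :
    (xs ++ ys).zip zs = xs.zip zs ++ ys.zip (zs.drop xs.length) := by
  induction xs generalizing zs with
  | nil => simp
  | cons x xs ih =>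
    cases zs with
    | nil => simp
    | cons z zs => simp [List.zip_cons_cons, ih]

theorem sumFor_append_ne (tl : List String) (sl : List Int) (t u : String) (h : u ≠ t) :
    sumFor (tl ++ [t]) sl u = sumFor tl sl u := by
  unfold sumFor
  rw [zip_append_drop]
  cases hd : sl.drop tl.length with
  | nil => simp
  | cons z zs =>
    have ht : (t == u) = false := by simp [Ne.symm h]
    simp [List.filter_append, ht]

theorem sumFor_append_self (tl : List String) (sl : List Int) (t : String)
    (h : tl.length < sl.length) :
    sumFor (tl ++ [t]) sl t = sumFor tl sl t + sl[tl.length] := by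
  unfold sumFor
  rw [zip_append_drop, List.drop_eq_getElem_cons h,
    show [t].zip (sl[tl.length] :: List.drop (tl.length + 1) sl) = [(t, sl[tl.length])] from rfl]
  simp [List.filter_append]

theorem sumFor_eq_zero_of_not_mem (tl : List String) (sl : List Int) (t : String)
    (h : ¬ t ∈ tl) : sumFor tl sl t = 0 := by
  unfold sumFor
  have hf : (tl.zip sl).filter (fun p => p.1 == t) = [] := by
    rw [List.filter_eq_nil_iff]
    intro p hp
    have hmem := (List.of_mem_zip hp).1
    simp only [beq_iff_eq]
    intro he
    exact h (he ▸ hmem)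
  simp [hf]

theorem map_getD_index (order : List String) (t : String) (f : String → Int)
    (hmem : t ∈ order) :
    (order.map f).getD ((PySem.List.index? order t).getD 0) 0 = f t := by
  induction order with
  | nil => simp at hmem
  | cons k rest ih =>
    by_cases hk : k = t
    · subst hk; rw [PySem.List.index?_cons_self]; simp
    · have hmem' : t ∈ rest := by
        rcases List.mem_cons.mp hmem with h | h
        · exact absurd h.symm hk
        · exact h
      rw [PySem.List.index?_cons_of_ne _ hk]
      have hsome : (PySem.List.index? rest t).isSome := by
        rw [PySem.List.index?_eq_idxOf?]; exact List.isSome_idxOf?.mpr hmem'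
      obtain ⟨n, hn⟩ := Option.isSome_iff_exists.mp hsome
      rw [hn]
      have := ih hmem'
      rw [hn] at this
      simpa using this

theorem map_update_eq_set (order : List String) (t : String) (f g : String → Int)
    (hnd : order.Nodup) (hmem : t ∈ order) (hfg : ∀ u ∈ order, u ≠ t → g u = f u) :
    order.map g = (order.map f).set ((PySem.List.index? order t).getD 0) (g t) := by
  induction order with
  | nil => simp at hmem
  | cons k rest ih =>
    simp only [List.nodup_cons] at hnd
    by_cases hk : k = t
    · subst hk
      rw [PySem.List.index?_cons_self]
      simp only [Option.getD_some, List.map_cons, List.set_cons_zero]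
      congr 1
      apply List.map_congr_left
      intro u hu
      exact hfg u (List.mem_cons_of_mem _ hu) (fun he => hnd.1 (he ▸ hu))
    · have hmem' : t ∈ rest := by
        rcases List.mem_cons.mp hmem with h | h
        · exact absurd h.symm hk
        · exact h
      rw [PySem.List.index?_cons_of_ne _ hk]
      have hsome : (PySem.List.index? rest t).isSome := by
        rw [PySem.List.index?_eq_idxOf?]; exact List.isSome_idxOf?.mpr hmem'
      obtain ⟨n, hn⟩ := Option.isSome_iff_exists.mp hsome
      rw [hn]
      simp only [Option.map_some, Option.getD_some, List.map_cons, List.set_cons_succ]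
      rw [hfg k (List.mem_cons_self) hk]
      congr 1
      have := ih hnd.2 hmem' (fun u hu hne => hfg u (List.mem_cons_of_mem _ hu) hne)
      rw [hn] at this
      simpa using this

theorem pre_mono (tl : List String) (t : String) (sl : List Int)
    (h : Pre_clean_up (tl ++ [t]) sl) : Pre_clean_up tl sl := by
  intro i hi hns
  apply h i (by simp; omega)
  have he : (tl ++ [t]).getD i "" = tl.getD i "" := by
    simp [List.getD, List.getElem?_append_left hi]
  rw [he]
  exact hns

theorem main_eq (sl : List Int) : ∀ tl : List String, Pre_clean_up tl sl →
    clean_up tl sl = clean_up_alt tl sl := by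
  intro tl
  induction tl using List.reverseRecOn with
  | nil => intro _; rfl
  | append_singleton tl t ih =>
    intro hpre
    have hpre' : Pre_clean_up tl sl := pre_mono tl t sl hpre
    obtain ⟨r, hr, hnd, hm⟩ := ord_spec tl
    have hAlt : clean_up_alt tl sl = (r, r.map (sumFor tl sl)) := by
      have hh : clean_up_alt tl sl
          = ((tl.foldl orderStep (PySem.Set.empty, [])).2,
             (tl.foldl orderStep (PySem.Set.empty, [])).2.map (sumFor tl sl)) := rfl
      rw [hh, hr]
    have hA : clean_up tl sl = (r, r.map (sumFor tl sl)) := (ih hpre').trans hAlt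
    have hsplitA : clean_up (tl ++ [t]) sl
        = cleanStepA sl (clean_up tl sl) ((tl.length : Int), t) := by
      unfold clean_up
      rw [PySem.List.enumerate_append, List.foldl_append]
      simp [PySem.List.enumerate_cons, PySem.List.enumerate_nil]
    have hsplitB : (tl ++ [t]).foldl orderStep (PySem.Set.empty, []) = orderStep (r, r) t := by
      rw [List.foldl_append, hr]
      rfl
    by_cases hsent : t ∈ pvSkipB
    · -- sentinel ticker: both sides unchanged
      have hstepB : orderStep (r, r) t = (r, r) := by
        rw [orderStep_diag]
        simp [hsent]
      have hBside : clean_up_alt (tl ++ [t]) sl = (r, r.map (sumFor (tl ++ [t]) sl)) := by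
        have hh : clean_up_alt (tl ++ [t]) sl
            = (((tl ++ [t]).foldl orderStep (PySem.Set.empty, [])).2,
               (((tl ++ [t]).foldl orderStep (PySem.Set.empty, [])).2).map (sumFor (tl ++ [t]) sl)) := rfl
        rw [hh, hsplitB, hstepB]
      have hsent' : t ∈ pvSentinels := hsent
      rw [hsplitA, hA, hBside]
      have hmap : r.map (sumFor (tl ++ [t]) sl) = r.map (sumFor tl sl) := by
        apply List.map_congr_left
        intro u hu
        have hune : u ≠ t := fun he => ((hm u).mp hu).2 (he ▸ hsent)
        exact sumFor_append_ne tl sl t u hune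
      rw [hmap]
      simp [cleanStepA, hsent']
    · have hsent' : ¬ t ∈ pvSentinels := hsent
      have hlen : tl.length < sl.length := by
        have hg : (tl ++ [t]).getD tl.length "" = t := by
          simp [List.getD]
        exact hpre tl.length (by simp) (by rw [hg]; exact hsent')
      by_cases hmem : t ∈ r
      · -- repeated ticker: A updates in place, B's per-ticker sum gains one term
        have hstepB : orderStep (r, r) t = (r, r) := by
          rw [orderStep_diag]
          simp [hmem]
        have hBside : clean_up_alt (tl ++ [t]) sl = (r, r.map (sumFor (tl ++ [t]) sl)) := by
          have hh : clean_up_alt (tl ++ [t]) sl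
              = (((tl ++ [t]).foldl orderStep (PySem.Set.empty, [])).2,
                 (((tl ++ [t]).foldl orderStep (PySem.Set.empty, [])).2).map (sumFor (tl ++ [t]) sl)) := rfl
          rw [hh, hsplitB, hstepB]
        rw [hsplitA, hA, hBside]
        have hAstep : cleanStepA sl (r, r.map (sumFor tl sl)) ((tl.length : Int), t)
            = (r, (r.map (sumFor tl sl)).set ((PySem.List.index? r t).getD 0)
                ((r.map (sumFor tl sl)).getD ((PySem.List.index? r t).getD 0) 0 + sl[tl.length])) := by
          unfold cleanStepA
          simp [hsent', hmem, List.getElem?_eq_getElem hlen]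
        rw [hAstep, map_getD_index r t (sumFor tl sl) hmem]
        have hmap : r.map (sumFor (tl ++ [t]) sl)
            = (r.map (sumFor tl sl)).set ((PySem.List.index? r t).getD 0)
                (sumFor (tl ++ [t]) sl t) := by
          apply map_update_eq_set r t (sumFor tl sl) (sumFor (tl ++ [t]) sl) hnd hmem
          intro u _ hune
          exact sumFor_append_ne tl sl t u hune
        rw [hmap, sumFor_append_self tl sl t hlen]
      · -- fresh ticker: both sides append
        have hnotin : ¬ t ∈ tl := fun htl => hmem ((hm t).mpr ⟨htl, hsent⟩)
        have hstepB : orderStep (r, r) t = (r ++ [t], r ++ [t]) := by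
          rw [orderStep_diag]
          simp [hsent, hmem]
        have hBside : clean_up_alt (tl ++ [t]) sl
            = (r ++ [t], (r ++ [t]).map (sumFor (tl ++ [t]) sl)) := by
          have hh : clean_up_alt (tl ++ [t]) sl
              = (((tl ++ [t]).foldl orderStep (PySem.Set.empty, [])).2,
                 (((tl ++ [t]).foldl orderStep (PySem.Set.empty, [])).2).map (sumFor (tl ++ [t]) sl)) := rfl
          rw [hh, hsplitB, hstepB]
        rw [hsplitA, hA, hBside]
        have hAstep : cleanStepA sl (r, r.map (sumFor tl sl)) ((tl.length : Int), t)
            = (r ++ [t], r.map (sumFor tl sl) ++ [sl[tl.length]]) := by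
          unfold cleanStepA
          simp [hsent', hmem, List.getElem?_eq_getElem hlen]
        rw [hAstep]
        have hmap : r.map (sumFor (tl ++ [t]) sl) = r.map (sumFor tl sl) := by
          apply List.map_congr_left
          intro u hu
          exact sumFor_append_ne tl sl t u (fun he => hmem (he ▸ hu))
        have hlast : sumFor (tl ++ [t]) sl t = sl[tl.length] := by
          rw [sumFor_append_self tl sl t hlen, sumFor_eq_zero_of_not_mem tl sl t hnotin,
            zero_add]
        simp [hmap, hlast]

-- ===== VERDICT (by name: the statement is the Claim_ definition above) =====
theorem clean_up_spec : Claim_equal_clean_up := by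
  intro ticker_list shares_list _ hpre
  exact main_eq shares_list ticker_list hpre
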